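-- pv_equiv track=rewrite | github.com/abil-nrg/concord | concord.py | sort_sentances
-- ===== SOURCE A (Python) =====
-- def lower_str_arr(arr):
--     """
--     Input: arr str[]
--     Output: the same array but with everything lowered
--     """
--     temp_arr = []
--     for word in arr:
--         temp_arr.append(word.lower())
--
--     return temp_arr
--
-- def sort_sentances(current_words, sent):
--     """
--     Input : curent_words - string [] , sent - string []
--     Output : final_sent - string [], the concorded array of all sentances, with the main word capitalized
--     """
--     final_sent = []
--     temp_current_words = []
--     lower_sent = lower_str_arr(sent) #lower everything
--     for x in range(0 , len(current_words)):
--         for y in range(0, len(sent)):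
--             sentance_lowered= lower_sent[y].split(' ') #turn the sent into an array
--             sentance_normal = sent[y].split(' ')
--             word = current_words[x]
--             for z in range(0, len(sentance_lowered)):
--                 if sentance_lowered[z] == word:
--                     placeholder_sent = sentance_normal.copy()
--                     placeholder_sent[z] = sentance_normal[z].upper()
--                     final_sent.append((' ').join(placeholder_sent))
--                     temp_current_words.append(word)
--     temp_current_words.sort()
--     return [final_sent, temp_current_words]
-- ===== SOURCE B (Python) =====
-- def occurrences(s):
--     """All (lowered token, sentence with that token capitalized) pairs of one sentence."""
--     parts = s.split(' ')
--     lowered = s.lower().split(' ')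
--     res = []
--     for z, tok in enumerate(lowered):
--         capped = parts.copy()
--         capped[z] = parts[z].upper()
--         res.append((tok, ' '.join(capped)))
--     return res
--
--
-- def sort_sentances(current_words, sent):
--     # one pass over all sentences: every occurrence, in sentence-then-position order
--     occ = [pair for s in sent for pair in occurrences(s)]
--     # group the capitalized variants by their lowered token, order preserved
--     index = {}
--     for tok, cap in occ:
--         index.setdefault(tok, []).append(cap)
--     # now only look words up; no rescan of the sentences per word
--     final_sent = []
--     matched = []
--     for w in current_words:
--         for cap in index.get(w, []):
--             final_sent.append(cap)
--             matched.append(w)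
--     matched.sort()
--     return [final_sent, matched]
-- ===== Notes on version B (the rewrite author's own statement) =====
-- stated objective: faster
-- what changed: Instead of rescanning and re-splitting every sentence for each search word (triple nested loop), B makes one pass over the sentences building a dict from each lowered token to its capitalized sentence variants in order, then only looks each word up.
import Mathlib
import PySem

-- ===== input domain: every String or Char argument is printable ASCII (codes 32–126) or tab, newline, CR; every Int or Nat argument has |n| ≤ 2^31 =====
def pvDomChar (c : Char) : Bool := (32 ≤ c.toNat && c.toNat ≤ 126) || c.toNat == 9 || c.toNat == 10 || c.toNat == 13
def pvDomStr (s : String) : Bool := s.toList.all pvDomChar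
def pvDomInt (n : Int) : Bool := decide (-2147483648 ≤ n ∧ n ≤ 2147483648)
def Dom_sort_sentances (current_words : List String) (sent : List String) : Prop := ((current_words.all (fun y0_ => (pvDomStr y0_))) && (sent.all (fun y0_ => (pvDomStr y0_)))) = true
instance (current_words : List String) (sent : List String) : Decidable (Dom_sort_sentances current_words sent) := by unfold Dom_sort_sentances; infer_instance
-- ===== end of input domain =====

-- B replaces A's per-word rescan and re-split of all sentences by a token index built in one pass; return values only (A mutates nothing observable).

-- ===== PORT A =====
-- s.split(sep) for a nonempty separator: PySem.Str.split? is `some` there, the default is never taken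
def pvSplit (s sep : String) : List String := (PySem.Str.split? s sep).getD []

def lower_str_arr (arr : List String) : List String :=
  arr.foldl (fun temp_arr word => temp_arr ++ [PySem.Str.lower word]) []

-- literal port of A's triple range-loop; `placeholder_sent[z] = …` is List.set at z
-- (z comes from range(0, len), hence nonnegative and in range: List.set is Python's item assignment there)
def sort_sentances (current_words : List String) (sent : List String) : List (List String) :=
  let lower_sent := lower_str_arr sent
  let p := (PySem.List.pyRange 0 (PySem.List.len current_words) 1).foldl (fun acc x =>
    (PySem.List.pyRange 0 (PySem.List.len sent) 1).foldl (fun acc y =>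
      let sentance_lowered := pvSplit (PySem.List.pyGetD lower_sent y "") " "
      let sentance_normal := pvSplit (PySem.List.pyGetD sent y "") " "
      let word := PySem.List.pyGetD current_words x ""
      (PySem.List.pyRange 0 (PySem.List.len sentance_lowered) 1).foldl (fun acc z =>
        if PySem.List.pyGetD sentance_lowered z "" == word then
          (acc.1 ++ [PySem.Str.join " " (sentance_normal.set z.toNat
                       (PySem.Str.upper (PySem.List.pyGetD sentance_normal z "")))],
           acc.2 ++ [word])
        else acc) acc) acc) (([], []) : List String × List String)
  [p.1, PySem.List.sorted p.2 (fun w => w) false]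

-- ===== PORT B =====
-- all (lowered token, sentence-with-that-token-capitalized) pairs of one sentence;
-- `capped[z] = parts[z].upper()` is List.set at the nonnegative in-range enumerate index
def occurrences (s : String) : List (String × String) :=
  let parts := pvSplit s " "
  let lowered := pvSplit (PySem.Str.lower s) " "
  (PySem.List.enumerate lowered).foldl (fun res p =>
    res ++ [(p.2, PySem.Str.join " " (parts.set p.1.toNat
              (PySem.Str.upper (PySem.List.pyGetD parts p.1 ""))))]) []

def sort_sentances_alt (current_words : List String) (sent : List String) : List (List String) :=
  let occ := sent.foldl (fun acc s => acc ++ occurrences s) []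
  let index := occ.foldl (fun d p => d.modify p.1 [] (fun l => l ++ [p.2]))
                 (PySem.Dict.empty : PySem.Dict String (List String))
  let p := current_words.foldl (fun acc w =>
      (index.getD w []).foldl (fun acc cap => (acc.1 ++ [cap], acc.2 ++ [w])) acc)
      (([], []) : List String × List String)
  [p.1, PySem.List.sorted p.2 (fun w => w) false]

-- ===== PRECONDITION & SPEC =====
def Spec_sort_sentances (current_words : List String) (sent : List String) (out : List (List String)) : Prop := out = sort_sentances_alt current_words sent
instance (current_words : List String) (sent : List String) (out : List (List String)) : Decidable (Spec_sort_sentances current_words sent out) := by unfold Spec_sort_sentances; infer_instance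

-- ===== CLAIM (what is proved, stated in full; the proofs are below) =====
def Claim_equal_sort_sentances : Prop := ∀ (current_words : List String) (sent : List String), Dom_sort_sentances current_words sent → Spec_sort_sentances current_words sent (sort_sentances current_words sent)

-- ===== LEMMAS AND PROOFS =====

-- a fold that appends to both components independently is two flatMaps
theorem pv_pair_foldl_flat {α β γ : Type} (l : List α) (e1 : α → List β) (e2 : α → List γ)
    (acc : List β × List γ) :
    l.foldl (fun acc x => (acc.1 ++ e1 x, acc.2 ++ e2 x)) acc
      = (acc.1 ++ l.flatMap e1, acc.2 ++ l.flatMap e2) := by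
  induction l generalizing acc with
  | nil => simp
  | cons h t ih => simp [ih, List.append_assoc]

-- the guarded double-append fold is a filter-then-map on each component
theorem pv_pair_foldl_filter {α β γ : Type} (l : List α) (p : α → Bool) (f : α → β) (w : γ)
    (acc : List β × List γ) :
    l.foldl (fun acc x => if p x then (acc.1 ++ [f x], acc.2 ++ [w]) else acc) acc
      = (acc.1 ++ (l.filter p).map f, acc.2 ++ (l.filter p).map (fun _ => w)) := by
  induction l generalizing acc with
  | nil => simp
  | cons h t ih =>
    by_cases hp : p h <;> simp [hp, ih, List.append_assoc]

-- the matching capitalized variants one word w contributes, across all of sent, in order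
def pvE (sent : List String) (w : String) : List String :=
  sent.flatMap (fun s => ((occurrences s).filter (fun p => p.1 == w)).map (fun p => p.2))

-- occurrences, as a map over the enumerated lowered tokens
theorem pv_occurrences_eq (s : String) :
    occurrences s
      = (PySem.List.enumerate (pvSplit (PySem.Str.lower s) " ")).map (fun p =>
          (p.2, PySem.Str.join " " ((pvSplit s " ").set p.1.toNat
            (PySem.Str.upper (PySem.List.pyGetD (pvSplit s " ") p.1 ""))))) := by
  unfold occurrences
  rw [PySem.List.foldl_append_singleton_eq_map]
  simp

-- what A's innermost z-loop contributes for one word and one sentence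
theorem pv_inner_loop (w s : String) (acc : List String × List String) :
    (PySem.List.pyRange 0 (PySem.List.len (pvSplit (PySem.Str.lower s) " ")) 1).foldl
      (fun acc z =>
        if PySem.List.pyGetD (pvSplit (PySem.Str.lower s) " ") z "" == w then
          (acc.1 ++ [PySem.Str.join " " ((pvSplit s " ").set z.toNat
                       (PySem.Str.upper (PySem.List.pyGetD (pvSplit s " ") z "")))],
           acc.2 ++ [w])
        else acc) acc
      = (acc.1 ++ ((occurrences s).filter (fun p => p.1 == w)).map (fun p => p.2),
         acc.2 ++ ((occurrences s).filter (fun p => p.1 == w)).map (fun _ => w)) := by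
  rw [pv_occurrences_eq,
      PySem.List.enumerate_eq_map_pyRange (pvSplit (PySem.Str.lower s) " ") "",
      List.filter_map, List.map_map, List.map_map,
      pv_pair_foldl_filter (PySem.List.pyRange 0 (PySem.List.len (pvSplit (PySem.Str.lower s) " ")) 1)
        (fun z => PySem.List.pyGetD (pvSplit (PySem.Str.lower s) " ") z "" == w)
        (fun z => PySem.Str.join " " ((pvSplit s " ").set z.toNat
                   (PySem.Str.upper (PySem.List.pyGetD (pvSplit s " ") z "")))) w acc]
  simp [List.filter_map, List.map_map, Function.comp_def]

-- what A's middle y-loop contributes for one word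
set_option maxHeartbeats 1000000 in
theorem pv_y_loop (sent : List String) (w : String) (acc : List String × List String) :
    (PySem.List.pyRange 0 (PySem.List.len sent) 1).foldl (fun acc y =>
      let sentance_lowered := pvSplit (PySem.List.pyGetD (lower_str_arr sent) y "") " "
      let sentance_normal := pvSplit (PySem.List.pyGetD sent y "") " "
      (PySem.List.pyRange 0 (PySem.List.len sentance_lowered) 1).foldl (fun acc z =>
        if PySem.List.pyGetD sentance_lowered z "" == w then
          (acc.1 ++ [PySem.Str.join " " (sentance_normal.set z.toNat
                       (PySem.Str.upper (PySem.List.pyGetD sentance_normal z "")))],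
           acc.2 ++ [w])
        else acc) acc) acc
      = (acc.1 ++ pvE sent w, acc.2 ++ (pvE sent w).map (fun _ => w)) := by
  have hmap : ∀ (y : Int),
      PySem.List.pyGetD (lower_str_arr sent) y "" = PySem.Str.lower (PySem.List.pyGetD sent y "") := by
    intro y
    have hlow : lower_str_arr sent = sent.map PySem.Str.lower := by
      unfold lower_str_arr
      rw [PySem.List.foldl_append_singleton_eq_map, List.nil_append]
    rw [hlow]
    have h0 : PySem.Str.lower "" = "" := by decide
    calc PySem.List.pyGetD (sent.map PySem.Str.lower) y ""
        = PySem.List.pyGetD (sent.map PySem.Str.lower) y (PySem.Str.lower "") := by rw [h0]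
      _ = PySem.Str.lower (PySem.List.pyGetD sent y "") := PySem.List.pyGetD_map _ _ _ _
  simp only [hmap]
  rw [PySem.List.foldl_pyRange_zero_pyGetD sent "" (fun acc s =>
    (PySem.List.pyRange 0 (PySem.List.len (pvSplit (PySem.Str.lower s) " ")) 1).foldl
      (fun acc z =>
        if PySem.List.pyGetD (pvSplit (PySem.Str.lower s) " ") z "" == w then
          (acc.1 ++ [PySem.Str.join " " ((pvSplit s " ").set z.toNat
                       (PySem.Str.upper (PySem.List.pyGetD (pvSplit s " ") z "")))],
           acc.2 ++ [w])
        else acc) acc) acc]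
  clear hmap
  induction sent generalizing acc with
  | nil => simp [pvE]
  | cons s t ih =>
    rw [List.foldl_cons, pv_inner_loop w s acc, ih]
    simp only [pvE, List.flatMap_cons, List.map_append, List.map_map, Function.comp_def,
               List.append_assoc]

-- B's lookup table, read back: the occurrences of w across all sentences, in order
theorem pv_index_getD (sent : List String) (w : String) :
    (((sent.foldl (fun acc s => acc ++ occurrences s) []).foldl
        (fun d p => d.modify p.1 [] (fun l => l ++ [p.2]))
        (PySem.Dict.empty : PySem.Dict String (List String))).getD w [])
      = pvE sent w := by
  rw [PySem.List.foldl_append_eq_flatMap, List.nil_append,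
      PySem.Dict.getD_foldl_modify_append, PySem.Dict.getD_empty, List.nil_append,
      List.filter_flatMap, List.map_flatMap]
  rfl

theorem pv_flatMap_const {α β : Type} (l : List α) (w : β) :
    l.flatMap (fun _ => [w]) = l.map (fun _ => w) := by
  induction l with
  | nil => rfl
  | cons h t ih => simp [ih]

-- B's emit loop over one word's stored occurrences
theorem pv_emit_fold (m : List String) (w : String) (acc : List String × List String) :
    m.foldl (fun acc cap => (acc.1 ++ [cap], acc.2 ++ [w])) acc
      = (acc.1 ++ m, acc.2 ++ m.map (fun _ => w)) := by
  refine Eq.trans (pv_pair_foldl_flat m (fun cap => [cap]) (fun _ => [w]) acc) ?_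
  simp [pv_flatMap_const]

set_option maxHeartbeats 1000000 in
theorem sort_sentances_eq_alt (current_words sent : List String) :
    sort_sentances current_words sent = sort_sentances_alt current_words sent := by
  unfold sort_sentances sort_sentances_alt
  have hA : ∀ (acc : List String × List String),
      (PySem.List.pyRange 0 (PySem.List.len current_words) 1).foldl (fun acc x =>
        (PySem.List.pyRange 0 (PySem.List.len sent) 1).foldl (fun acc y =>
          let sentance_lowered := pvSplit (PySem.List.pyGetD (lower_str_arr sent) y "") " "
          let sentance_normal := pvSplit (PySem.List.pyGetD sent y "") " "
          let word := PySem.List.pyGetD current_words x ""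
          (PySem.List.pyRange 0 (PySem.List.len sentance_lowered) 1).foldl (fun acc z =>
            if PySem.List.pyGetD sentance_lowered z "" == word then
              (acc.1 ++ [PySem.Str.join " " (sentance_normal.set z.toNat
                           (PySem.Str.upper (PySem.List.pyGetD sentance_normal z "")))],
               acc.2 ++ [word])
            else acc) acc) acc) acc
      = (acc.1 ++ current_words.flatMap (pvE sent),
         acc.2 ++ current_words.flatMap (fun w => (pvE sent w).map (fun _ => w))) := by
    intro acc
    rw [PySem.List.foldl_pyRange_zero_pyGetD current_words ""
      (fun acc word =>
        (PySem.List.pyRange 0 (PySem.List.len sent) 1).foldl (fun acc y =>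
          let sentance_lowered := pvSplit (PySem.List.pyGetD (lower_str_arr sent) y "") " "
          let sentance_normal := pvSplit (PySem.List.pyGetD sent y "") " "
          (PySem.List.pyRange 0 (PySem.List.len sentance_lowered) 1).foldl (fun acc z =>
            if PySem.List.pyGetD sentance_lowered z "" == word then
              (acc.1 ++ [PySem.Str.join " " (sentance_normal.set z.toNat
                           (PySem.Str.upper (PySem.List.pyGetD sentance_normal z "")))],
               acc.2 ++ [word])
            else acc) acc) acc) acc]
    induction current_words generalizing acc with
    | nil => simp
    | cons w t ih =>
      rw [List.foldl_cons, pv_y_loop sent w acc, ih]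
      simp only [List.flatMap_cons, List.append_assoc]
  have hB : ∀ (acc : List String × List String),
      current_words.foldl (fun acc w =>
        ((((sent.foldl (fun acc s => acc ++ occurrences s) []).foldl
            (fun d p => d.modify p.1 [] (fun l => l ++ [p.2]))
            (PySem.Dict.empty : PySem.Dict String (List String))).getD w [])).foldl
          (fun acc cap => (acc.1 ++ [cap], acc.2 ++ [w])) acc) acc
      = (acc.1 ++ current_words.flatMap (pvE sent),
         acc.2 ++ current_words.flatMap (fun w => (pvE sent w).map (fun _ => w))) := by
    intro acc
    clear hA
    induction current_words generalizing acc with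
    | nil => simp
    | cons w t ih =>
      rw [List.foldl_cons, pv_index_getD sent w, pv_emit_fold (pvE sent w) w acc, ih]
      simp only [List.flatMap_cons, List.append_assoc]
  simp only [hA, hB]

-- ===== VERDICT (by name: the statement is the Claim_ definition above) =====
theorem sort_sentances_spec : Claim_equal_sort_sentances := by
  intro current_words sent _
  unfold Spec_sort_sentances
  exact sort_sentances_eq_alt current_words sent
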